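-- pv_equiv track=rewrite | github.com/bbanks2/AOC2019 | AOC2021/p10.py | ansa
-- ===== SOURCE A (Python) =====
-- def ansa(a):
--     res = 0
--     for e in a:
--         if (e == ')'): res += 3
--         if (e == ']'): res += 57
--         if (e == '}'): res += 1197
--         if (e == '>'): res += 25137
--     return res
-- ===== SOURCE B (Python) =====
-- SCORES = {')': 3, ']': 57, '}': 1197, '>': 25137}
--
-- def ansa(a):
--     n = len(a)
--     if n == 0:
--         return 0
--     if n == 1:
--         return SCORES.get(a[0], 0)
--     m = n // 2
--     return ansa(a[:m]) + ansa(a[m:])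
-- ===== Notes on version B (the rewrite author's own statement) =====
-- stated objective: alternative
-- what changed: Replaced the single accumulating loop with four chained branches by a divide-and-conquer recursion: split the list in half, score singletons via a table lookup, and add the two halves' scores.
import Mathlib
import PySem

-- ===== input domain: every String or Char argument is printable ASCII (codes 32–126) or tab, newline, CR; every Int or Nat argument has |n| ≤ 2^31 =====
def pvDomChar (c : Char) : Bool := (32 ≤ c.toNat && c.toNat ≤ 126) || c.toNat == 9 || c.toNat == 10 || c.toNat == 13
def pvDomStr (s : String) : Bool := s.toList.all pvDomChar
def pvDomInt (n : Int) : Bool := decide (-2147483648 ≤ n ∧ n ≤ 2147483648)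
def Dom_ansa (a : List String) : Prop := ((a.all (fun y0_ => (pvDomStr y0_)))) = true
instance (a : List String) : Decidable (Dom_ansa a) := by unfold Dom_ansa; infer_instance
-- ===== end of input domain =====

-- B replaces A's single accumulating loop with four chained branches by a divide-and-conquer recursion: split the list in half, score singletons via a table lookup, add the halves (alternative decomposition, same total work).


-- ===== PORT A =====
def ansa (a : List String) : Int :=
  a.foldl (fun res e =>
    let res := if e == ")" then res + 3 else res
    let res := if e == "]" then res + 57 else res
    let res := if e == "}" then res + 1197 else res
    let res := if e == ">" then res + 25137 else res
    res) 0

-- ===== PORT B =====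
def SCORES : PySem.Dict String Int :=
  PySem.Dict.ofList [(")", 3), ("]", 57), ("}", 1197), (">", 25137)]

-- a[:n//2] and a[n//2:] as take/drop of half the length (cited by the port's decreasing_by)
theorem pv_half_to (a : List String) :
    PySem.List.slice a none (some (PySem.Int.floordiv (a.length : Int) 2)) = a.take (a.length / 2) := by
  have hc : PySem.Int.floordiv (a.length : Int) 2 = ((a.length / 2 : Nat) : Int) := by
    rw [PySem.Int.floordiv_eq_ediv_of_pos (by omega)]; omega
  rw [hc, PySem.List.slice_to_natCast]

theorem pv_half_from (a : List String) :
    PySem.List.slice a (some (PySem.Int.floordiv (a.length : Int) 2)) none = a.drop (a.length / 2) := by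
  have hc : PySem.Int.floordiv (a.length : Int) 2 = ((a.length / 2 : Nat) : Int) := by
    rw [PySem.Int.floordiv_eq_ediv_of_pos (by omega)]; omega
  rw [hc, PySem.List.slice_from_natCast]

def ansa_alt (a : List String) : Int :=
  if a.length = 0 then 0
  else if a.length = 1 then SCORES.getD ((PySem.List.pyGet? a 0).getD "") 0
  else
    let m := PySem.Int.floordiv (a.length : Int) 2
    ansa_alt (PySem.List.slice a none (some m)) + ansa_alt (PySem.List.slice a (some m) none)
termination_by a.length
decreasing_by
  · rw [pv_half_to]; simp only [List.length_take]; omega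
  · rw [pv_half_from]; simp only [List.length_drop]; omega

-- ===== PRECONDITION & SPEC =====
def Spec_ansa (a : List String) (out : Int) : Prop := out = ansa_alt a
instance (a : List String) (out : Int) : Decidable (Spec_ansa a out) := by unfold Spec_ansa; infer_instance

-- ===== CLAIM (what is proved, stated in full; the proofs are below) =====
def Claim_equal_ansa : Prop := ∀ (a : List String), Dom_ansa a → Spec_ansa a (ansa a)

-- ===== LEMMAS AND PROOFS =====
-- both programs compute this weighted count of the four bracket strings
def pvScore (a : List String) : Int :=
  3 * (a.count ")" : Int) + 57 * (a.count "]" : Int)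
    + 1197 * (a.count "}" : Int) + 25137 * (a.count ">" : Int)

theorem ansa_foldl_acc (a : List String) (r : Int) :
    a.foldl (fun res e =>
      let res := if e == ")" then res + 3 else res
      let res := if e == "]" then res + 57 else res
      let res := if e == "}" then res + 1197 else res
      let res := if e == ">" then res + 25137 else res
      res) r = r + pvScore a := by
  induction a generalizing r with
  | nil => simp [pvScore]
  | cons x xs ih =>
    simp only [List.foldl_cons, ih, pvScore, List.count_cons]
    by_cases h1 : x = ")" <;> by_cases h2 : x = "]" <;> by_cases h3 : x = "}" <;>
      by_cases h4 : x = ">" <;>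
      simp only [h1, h2, h3, h4, beq_iff_eq, if_pos, if_neg,
        String.reduceEq, beq_self_eq_true, not_false_eq_true] <;>
      push_cast <;> ring

theorem pvScore_append (xs ys : List String) :
    pvScore (xs ++ ys) = pvScore xs + pvScore ys := by
  simp only [pvScore, List.count_append]
  push_cast; ring

theorem SCORES_items :
    SCORES.items = [(")", (3:Int)), ("]", 57), ("}", 1197), (">", 25137)] := by decide

theorem pvScore_singleton (x : String) :
    pvScore [x] = SCORES.getD x 0 := by
  by_cases h1 : x = ")"
  · subst h1; decide
  · by_cases h2 : x = "]"
    · subst h2; decide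
    · by_cases h3 : x = "}"
      · subst h3; decide
      · by_cases h4 : x = ">"
        · subst h4; decide
        · have e1 : ((")":String) == x) = false := beq_eq_false_iff_ne.mpr (fun h => h1 h.symm)
          have e2 : (("]":String) == x) = false := beq_eq_false_iff_ne.mpr (fun h => h2 h.symm)
          have e3 : (("}":String) == x) = false := beq_eq_false_iff_ne.mpr (fun h => h3 h.symm)
          have e4 : ((">":String) == x) = false := beq_eq_false_iff_ne.mpr (fun h => h4 h.symm)
          simp [pvScore, PySem.Dict.getD, PySem.Dict.get?, SCORES_items, List.find?,
            e1, e2, e3, e4, h1, h2, h3, h4]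

theorem ansa_alt_eq_pvScore (a : List String) : ansa_alt a = pvScore a := by
  induction hn : a.length using Nat.strong_induction_on generalizing a with
  | _ n ih =>
    subst hn
    by_cases h0 : a.length = 0
    · rw [ansa_alt, if_pos h0]
      simp [pvScore, List.length_eq_zero_iff.mp h0]
    · by_cases h1 : a.length = 1
      · obtain ⟨x, hx⟩ := List.length_eq_one_iff.mp h1
        rw [ansa_alt, if_neg h0, if_pos h1]
        subst hx
        rw [pvScore_singleton]
        simp [PySem.List.pyGet?, PySem.List.pyIdx?]
      · rw [ansa_alt, if_neg h0, if_neg h1]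
        simp only [pv_half_to, pv_half_from]
        rw [ih (a.take (a.length / 2)).length (by simp [List.length_take]; omega) _ rfl,
            ih (a.drop (a.length / 2)).length (by simp [List.length_drop]; omega) _ rfl,
            ← pvScore_append, List.take_append_drop]

-- ===== VERDICT (by name: the statement is the Claim_ definition above) =====
theorem ansa_spec : Claim_equal_ansa := by
  intro a _
  unfold Spec_ansa ansa
  rw [ansa_foldl_acc, ansa_alt_eq_pvScore, zero_add]
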